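-- pv_equiv track=rewrite | github.com/rickardlindberg/one-file-programs | smartnotes/smartnotes.py | _sort_links
-- ===== SOURCE A (Python) =====
-- def _sort_links(links, sort_keys):
--     links_by_sort_key = {}
--     for link_id, link in links:
--         for sort_key in sort_keys:
--             if sort_key in link:
--                 if sort_key not in links_by_sort_key:
--                     links_by_sort_key[sort_key] = []
--                 links_by_sort_key[sort_key].append((link_id, link))
--                 break
--         else:
--             raise ValueError(f"None of the sort keys {sort_keys!r} found in link {link_id}: {link!r}.")
--     sorted_combined = []
--     for sort_key in sort_keys:
--         sorted_combined.extend(sorted(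
--             links_by_sort_key.get(sort_key, []),
--             key=lambda item: item[1][sort_key]
--         ))
--     return sorted_combined
-- ===== SOURCE B (Python) =====
-- def _sort_links(links, sort_keys):
--     def sort_rank(link_id, link):
--         for index, sort_key in enumerate(sort_keys):
--             if sort_key in link:
--                 return (index, sort_key, link[sort_key])
--         raise ValueError(f"None of the sort keys {sort_keys!r} found in link {link_id}: {link!r}.")
--     decorated = [(sort_rank(link_id, link), (link_id, link)) for link_id, link in links]
--     decorated.sort(key=lambda pair: (pair[0][0], pair[0][2]))
--     return [item for sk in sort_keys for (rank, item) in decorated if rank[1] == sk]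
-- ===== Notes on version B (the rewrite author's own statement) =====
-- stated objective: alternative
-- what changed: Replaces bucket-links-into-a-dict-by-first-matching-sort-key-then-sort-each-bucket with one global stable sort of all links under the composite key (index of first matching sort key, its value), emitting each sort key's group from that single sorted list.
import Mathlib
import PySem

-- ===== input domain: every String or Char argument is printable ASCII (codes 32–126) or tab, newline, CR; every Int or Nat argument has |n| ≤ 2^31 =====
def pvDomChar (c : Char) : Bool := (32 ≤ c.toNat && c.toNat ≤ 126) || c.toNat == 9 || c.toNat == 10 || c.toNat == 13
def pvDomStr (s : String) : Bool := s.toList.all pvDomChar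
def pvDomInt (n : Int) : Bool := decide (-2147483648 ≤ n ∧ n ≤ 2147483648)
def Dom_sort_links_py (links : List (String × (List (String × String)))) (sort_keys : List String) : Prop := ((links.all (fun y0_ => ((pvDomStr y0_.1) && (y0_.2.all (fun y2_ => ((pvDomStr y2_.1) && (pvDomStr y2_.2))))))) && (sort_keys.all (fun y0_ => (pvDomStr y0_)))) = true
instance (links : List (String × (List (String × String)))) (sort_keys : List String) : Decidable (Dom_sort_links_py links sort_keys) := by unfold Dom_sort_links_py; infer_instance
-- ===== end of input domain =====

-- B replaces bucket-by-first-matching-sort-key-then-sort-each-bucket with one global stable sort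
-- under the composite key (index of first matching sort key, its value), then emits each key's
-- group from that single sorted list: an alternative decomposition (no speed claim).


-- ===== PORT A =====
-- inner 'for sort_key in sort_keys: if sort_key in link: … break / else: raise' — first matching sort key
def pvFirstKeyA (link : List (String × String)) (sks : List String) : Option String :=
  match sks with
  | [] => none
  | k :: t => if (PySem.Dict.mk link).contains k then some k else pvFirstKeyA link t

-- the bucketing loop: 'for link_id, link in links: …'; none = the ValueError path
def pvBucketsA (sks : List String) (d : PySem.Dict String (List (String × (List (String × String))))) (links : List (String × (List (String × String)))) : Option (PySem.Dict String (List (String × (List (String × String))))) :=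
  match links with
  | [] => some d
  | it :: rest =>
    match pvFirstKeyA it.2 sks with
    | none => none
    | some k =>
      let d1 := if d.contains k then d else d.insert k []
      pvBucketsA sks (d1.insert k (d1.getD k [] ++ [it])) rest

def sort_links_py (links : List (String × (List (String × String)))) (sort_keys : List String) : List (String × (List (String × String))) :=
  match pvBucketsA sort_keys (PySem.Dict.mk []) links with
  | none => []   -- ValueError path (excluded by Pre_)
  | some d =>
    sort_keys.foldl
      (fun acc k => acc ++ PySem.List.sorted (d.getD k []) (fun it => (PySem.Dict.mk it.2).getD k "") false)
      []

-- ===== PORT B =====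
-- 'for index, sort_key in enumerate(sort_keys): if sort_key in link: return (index, sort_key, link[sort_key])'
def pvRankB (link : List (String × String)) (i : Nat) (sks : List String) : Option (Nat × String × String) :=
  match sks with
  | [] => none
  | k :: t => if (PySem.Dict.mk link).contains k then some (i, k, (PySem.Dict.mk link).getD k "") else pvRankB link (i + 1) t

def sort_links_py_alt (links : List (String × (List (String × String)))) (sort_keys : List String) : List (String × (List (String × String))) :=
  match links.mapM (fun it => (pvRankB it.2 0 sort_keys).map (fun r => (r, it))) with
  | none => []   -- ValueError path (excluded by Pre_)
  | some decorated =>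
    let sortedAll := PySem.List.sorted2 decorated (fun p => p.1.1) (fun p => p.1.2.2) false
    sort_keys.flatMap (fun sk => (sortedAll.filter (fun p => p.1.2.1 == sk)).map (fun p => p.2))

-- ===== PRECONDITION & SPEC =====
-- Pre_ excludes exactly the inputs where some link contains none of the sort keys:
-- there A raises ValueError (and B raises the identical ValueError).
def Pre_sort_links_py (links : List (String × (List (String × String)))) (sort_keys : List String) : Prop :=
  ∀ it ∈ links, ∃ k ∈ sort_keys, k ∈ it.2.map Prod.fst
instance (links : List (String × (List (String × String)))) (sort_keys : List String) : Decidable (Pre_sort_links_py links sort_keys) := by unfold Pre_sort_links_py; infer_instance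

def pvWitness_sort_links_py : (List (String × (List (String × String)))) × List String :=
  ([("l1", [("a", "x")]), ("l2", [("b", "y")])], ["a", "b"])

def Spec_sort_links_py (links : List (String × (List (String × String)))) (sort_keys : List String) (out : List (String × (List (String × String)))) : Prop := out = sort_links_py_alt links sort_keys
instance (links : List (String × (List (String × String)))) (sort_keys : List String) (out : List (String × (List (String × String)))) : Decidable (Spec_sort_links_py links sort_keys out) := by unfold Spec_sort_links_py; infer_instance

-- ===== CLAIM (what is proved, stated in full; the proofs are below) =====
def Claim_equal_sort_links_py : Prop := ∀ (links : List (String × (List (String × String)))) (sort_keys : List String), Dom_sort_links_py links sort_keys → Pre_sort_links_py links sort_keys → Spec_sort_links_py links sort_keys (sort_links_py links sort_keys)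

-- ===== LEMMAS AND PROOFS =====

-- index of the first sort key present in the link (proof-side characterisation of both helpers)
def pvPrioIdx (link : List (String × String)) (sks : List String) : Option Nat :=
  match sks with
  | [] => none
  | k :: t => if (PySem.Dict.mk link).contains k then some 0 else (pvPrioIdx link t).map (· + 1)

theorem pvRankB_eq (link : List (String × String)) (sks : List String) (i : Nat) :
    pvRankB link i sks = (pvPrioIdx link sks).map
      (fun j => (i + j, sks.getD j "", (PySem.Dict.mk link).getD (sks.getD j "") "")) := by
  induction sks generalizing i with
  | nil => simp [pvRankB, pvPrioIdx]
  | cons k t ih =>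
    simp only [pvRankB, pvPrioIdx]
    split
    · simp
    · rw [ih]
      cases h : pvPrioIdx link t <;> simp [h, Prod.ext_iff] <;> omega

theorem pvFirstKeyA_eq (link : List (String × String)) (sks : List String) :
    pvFirstKeyA link sks = (pvPrioIdx link sks).map (fun j => sks.getD j "") := by
  induction sks with
  | nil => simp [pvFirstKeyA, pvPrioIdx]
  | cons k t ih =>
    simp only [pvFirstKeyA, pvPrioIdx]
    split
    · simp
    · rw [ih]
      cases h : pvPrioIdx link t <;> simp [h]

theorem pvPrioIdx_lt (link : List (String × String)) (sks : List String) (j : Nat)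
    (h : pvPrioIdx link sks = some j) : j < sks.length := by
  induction sks generalizing j with
  | nil => simp [pvPrioIdx] at h
  | cons k t ih =>
    simp only [pvPrioIdx] at h
    split at h
    · simp at h; simp; omega
    · cases h' : pvPrioIdx link t with
      | none => rw [h'] at h; simp at h
      | some m => rw [h'] at h; simp at h; have := ih m h'; simp; omega

-- insertBy toolbox
theorem pvInsertBy_congr {α : Type} (b1 b2 : α → α → Bool) (x : α) (ys : List α)
    (h : ∀ y ∈ ys, b1 x y = b2 x y) : PySem.List.insertBy b1 x ys = PySem.List.insertBy b2 x ys := by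
  induction ys with
  | nil => rfl
  | cons y t ih =>
    simp only [PySem.List.insertBy]
    rw [h y (by simp)]
    split
    · rfl
    · rw [ih (fun z hz => h z (by simp [hz]))]

theorem pvInsertBy_append_left {α : Type} (b : α → α → Bool) (x : α) (l t : List α)
    (h : ∀ y ∈ l, b x y = false) : PySem.List.insertBy b x (l ++ t) = l ++ PySem.List.insertBy b x t := by
  induction l with
  | nil => rfl
  | cons y l' ih =>
    simp only [List.cons_append, PySem.List.insertBy, h y (by simp)]
    simp [ih (fun z hz => h z (by simp [hz]))]

theorem pvInsertBy_append_right {α : Type} (b : α → α → Bool) (x : α) (l t : List α)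
    (h : ∀ y ∈ t, b x y = true) : PySem.List.insertBy b x (l ++ t) = PySem.List.insertBy b x l ++ t := by
  induction l with
  | nil =>
    cases t with
    | nil => rfl
    | cons y t' => simp [PySem.List.insertBy, h y (by simp)]
  | cons y l' ih =>
    simp only [List.cons_append, PySem.List.insertBy]
    split
    · rfl
    · simp [ih]

theorem pvMap_insertBy {α β : Type} (g : α → β) (b : β → β → Bool) (x : α) (ys : List α) :
    (PySem.List.insertBy (fun a a' => b (g a) (g a')) x ys).map g = PySem.List.insertBy b (g x) (ys.map g) := by
  induction ys with
  | nil => rfl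
  | cons y t ih =>
    simp only [List.map_cons, PySem.List.insertBy]
    split
    · rfl
    · simp [ih]

theorem pvSorted_append_singleton {α κ : Type} [LinearOrder κ] (l : List α) (x : α) (key : α → κ) :
    PySem.List.sorted (l ++ [x]) key false
      = PySem.List.insertBy (fun a a' => decide (key a < key a')) x (PySem.List.sorted l key false) := by
  rw [PySem.List.sorted_eq_foldl_insertBy, PySem.List.sorted_eq_foldl_insertBy, List.foldl_append]
  rfl

theorem pvSorted2_append_singleton {α : Type} (l : List α) (x : α) (k1 : α → Nat) (k2 : α → String) :
    PySem.List.sorted2 (l ++ [x]) k1 k2 false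
      = PySem.List.insertBy
          (fun a a' => decide (k1 a < k1 a') || (!decide (k1 a' < k1 a) && decide (k2 a < k2 a')))
          x (PySem.List.sorted2 l k1 k2 false) := by
  show List.foldl _ [] (l ++ [x]) = _
  rw [List.foldl_append]
  rfl

theorem pvSorted_congr {α κ : Type} [LinearOrder κ] (l : List α) (key key' : α → κ)
    (h : ∀ y ∈ l, key y = key' y) : PySem.List.sorted l key false = PySem.List.sorted l key' false := by
  induction l using List.reverseRecOn with
  | nil => rfl
  | append_singleton l' x ih =>
    rw [pvSorted_append_singleton, pvSorted_append_singleton,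
      ih (fun z hz => h z (by simp [hz]))]
    refine pvInsertBy_congr _ _ _ _ (fun y hy => ?_)
    rw [PySem.List.mem_sorted] at hy
    rw [h x (by simp), h y (by simp [hy])]

theorem pvMap_sorted {α β κ : Type} [LinearOrder κ] (g : α → β) (l : List α) (key : β → κ) :
    PySem.List.sorted (l.map g) key false = (PySem.List.sorted l (fun x => key (g x)) false).map g := by
  induction l using List.reverseRecOn with
  | nil => rfl
  | append_singleton l' x ih =>
    rw [List.map_append, List.map_singleton, pvSorted_append_singleton,
      pvSorted_append_singleton, ih, ← pvMap_insertBy]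

-- the stability decomposition: one lexicographic stable sort = concatenation of per-priority stable sorts
theorem pvSorted2_decompose {α : Type} (xs : List α) (k1 : α → Nat) (k2 : α → String) (n : Nat)
    (h : ∀ x ∈ xs, k1 x < n) :
    PySem.List.sorted2 xs k1 k2 false
      = (List.range n).flatMap (fun i => PySem.List.sorted (xs.filter (fun x => k1 x == i)) k2 false) := by
  induction xs using List.reverseRecOn with
  | nil => simp [PySem.List.sorted2, PySem.List.sorted]
  | append_singleton l' x ih =>
    have hx : k1 x < n := h x (by simp)
    have hl : ∀ y ∈ l', k1 y < n := fun y hy => h y (by simp [hy])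
    have hsplit : List.range n
        = List.range' 0 (k1 x) ++ k1 x :: List.range' (k1 x + 1) (n - k1 x - 1) := by
      rw [List.range_eq_range']
      have e0 : n = k1 x + (n - k1 x) := by omega
      rw [e0, ← List.range'_append (s := 0) (m := k1 x) (n := n - k1 x) (step := 1)]
      have e1 : n - k1 x = (n - k1 x - 1) + 1 := by omega
      rw [e1, List.range'_succ]
      simp
    rw [pvSorted2_append_singleton, ih hl, hsplit]
    simp only [List.flatMap_append, List.flatMap_cons]
    rw [pvInsertBy_append_left _ x _ _ (by
      intro y hy
      simp only [List.mem_flatMap] at hy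
      obtain ⟨i, hi, hyi⟩ := hy
      rw [List.mem_range'_1] at hi
      rw [PySem.List.mem_sorted, List.mem_filter] at hyi
      have : k1 y = i := by simpa using hyi.2
      simp only [Bool.or_eq_false_iff, Bool.and_eq_false_iff, decide_eq_false_iff_not]
      constructor
      · omega
      · left; simp only [Bool.not_eq_false', decide_eq_true_eq]; omega)]
    rw [pvInsertBy_append_right _ x _ _ (by
      intro y hy
      simp only [List.mem_flatMap] at hy
      obtain ⟨i, hi, hyi⟩ := hy
      rw [List.mem_range'_1] at hi
      rw [PySem.List.mem_sorted, List.mem_filter] at hyi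
      have : k1 y = i := by simpa using hyi.2
      simp only [Bool.or_eq_true, decide_eq_true_eq]
      left; omega)]
    rw [pvInsertBy_congr _ (fun a a' => decide (k2 a < k2 a')) x _ (by
      intro y hy
      rw [PySem.List.mem_sorted, List.mem_filter] at hy
      have : k1 y = k1 x := by simpa using hy.2
      simp [this])]
    rw [← pvSorted_append_singleton]
    congr 1
    · refine List.flatMap_congr (fun i hi => ?_)
      rw [List.mem_range'_1] at hi
      rw [List.filter_append]
      have : (k1 x == i) = false := by simp; omega
      simp [List.filter_cons, this]
    congr 1
    · rw [List.filter_append]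
      simp [List.filter_cons]
    · refine List.flatMap_congr (fun i hi => ?_)
      rw [List.mem_range'_1] at hi
      rw [List.filter_append]
      have : (k1 x == i) = false := by simp; omega
      simp [List.filter_cons, this]

-- A-side: the bucket dictionary holds exactly the filters
theorem pvGetD_of_not_contains {κ ν : Type} [BEq κ] [LawfulBEq κ] (d : PySem.Dict κ ν) (k : κ) (v0 : ν)
    (h : d.contains k = false) : d.getD k v0 = v0 := by
  simp only [PySem.Dict.contains, List.any_eq_false] at h
  have hf : d.items.find? (fun p => p.1 == k) = none :=
    List.find?_eq_none.mpr (fun x hx => by simpa using h x hx)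
  simp [PySem.Dict.getD, PySem.Dict.get?, hf]

theorem pvBucketsA_getD (sks : List String) (links : List (String × (List (String × String))))
    (hall : ∀ it ∈ links, (pvFirstKeyA it.2 sks).isSome) (d : PySem.Dict String (List (String × (List (String × String))))) :
    ∃ dfin, pvBucketsA sks d links = some dfin ∧
      ∀ k, dfin.getD k [] = d.getD k [] ++ links.filter (fun it => pvFirstKeyA it.2 sks == some k) := by
  induction links generalizing d with
  | nil => exact ⟨d, rfl, by simp⟩
  | cons it rest ih =>
    obtain ⟨k', hk'⟩ := Option.isSome_iff_exists.mp (hall it (by simp))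
    have hstep : ∀ k, ((if d.contains k' then d else d.insert k' []).insert k'
        ((if d.contains k' then d else d.insert k' []).getD k' [] ++ [it])).getD k ([] : List (String × (List (String × String))))
        = if k = k' then d.getD k [] ++ [it] else d.getD k [] := by
      intro k
      by_cases hc : d.contains k' = true
      · simp only [hc, if_true, PySem.Dict.getD_insert]
        split
        · next heq => subst heq; rfl
        · rfl
      · have hc' : d.contains k' = false := by simpa using hc
        have hd : d.getD k' ([] : List (String × (List (String × String)))) = [] :=
          pvGetD_of_not_contains d k' [] hc'
        simp only [hc', Bool.false_eq_true, if_false, PySem.Dict.getD_insert, if_pos rfl]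
        split
        · next heq => subst heq; simp [hd]
        · next hne => simp [hne]
    obtain ⟨dfin, hrun, hgd⟩ := ih (fun z hz => hall z (by simp [hz]))
      ((if d.contains k' then d else d.insert k' []).insert k'
        ((if d.contains k' then d else d.insert k' []).getD k' [] ++ [it]))
    refine ⟨dfin, ?_, ?_⟩
    · simp only [pvBucketsA, hk']
      exact hrun
    · intro k
      rw [hgd k, hstep k, List.filter_cons]
      by_cases hkk : k' = k
      · subst hkk
        simp [hk']
      · have : (pvFirstKeyA it.2 sks == some k) = false := by simp [hk', hkk]
        simp [this, Ne.symm hkk]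

theorem pvMapM_eq_map {α β : Type} (f : α → Option β) (g : α → β) (l : List α)
    (h : ∀ x ∈ l, f x = some (g x)) : l.mapM f = some (l.map g) := by
  induction l with
  | nil => rfl
  | cons a t ih =>
    rw [List.mapM_cons, h a (by simp), ih (fun z hz => h z (by simp [hz]))]
    rfl

theorem pvContains_iff (link : List (String × String)) (k : String) :
    (PySem.Dict.mk link).contains k = true ↔ k ∈ link.map Prod.fst := by
  simp [PySem.Dict.contains, List.any_eq_true, List.mem_map]

theorem pvFirstKeyA_isSome (link : List (String × String)) (sks : List String)
    (h : ∃ k ∈ sks, k ∈ link.map Prod.fst) : (pvFirstKeyA link sks).isSome := by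
  induction sks with
  | nil => simp at h
  | cons k0 t ih =>
    simp only [pvFirstKeyA]
    split
    · rfl
    · next hc =>
      obtain ⟨k, hk, hmem⟩ := h
      rcases List.mem_cons.mp hk with rfl | hkt
      · exact absurd ((pvContains_iff link k).mpr hmem) (by simpa using hc)
      · exact ih ⟨k, hkt, hmem⟩

-- minimality of the first matching index
theorem pvPrioIdx_min (link : List (String × String)) (sks : List String) (j : Nat)
    (h : pvPrioIdx link sks = some j) :
    (∀ j' < j, (PySem.Dict.mk link).contains (sks.getD j' "") = false) ∧
      (PySem.Dict.mk link).contains (sks.getD j "") = true := by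
  induction sks generalizing j with
  | nil => simp [pvPrioIdx] at h
  | cons k0 t ih =>
    simp only [pvPrioIdx] at h
    split at h
    · next hc =>
      simp only [Option.some.injEq] at h
      subst h
      exact ⟨fun j' hj' => absurd hj' (by omega), by rw [List.getD_cons_zero]; exact hc⟩
    · next hc =>
      cases h' : pvPrioIdx link t with
      | none => rw [h'] at h; simp at h
      | some m =>
        rw [h'] at h; simp only [Option.map_some, Option.some.injEq] at h
        obtain ⟨ihmin, ihc⟩ := ih m h'
        subst h
        refine ⟨fun j' hj' => ?_, by simpa using ihc⟩
        cases j' with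
        | zero => rw [List.getD_cons_zero]; exact Bool.eq_false_iff.mpr hc
        | succ j'' => simpa using ihmin j'' (by omega)

theorem pvFilter_of_forall {α : Type} (L : List α) (p : α → Bool) (b : Bool)
    (h : ∀ y ∈ L, p y = b) : L.filter p = if b then L else [] := by
  induction L with
  | nil => simp
  | cons x t ih =>
    rw [List.filter_cons, h x (by simp), ih (fun z hz => h z (by simp [hz]))]
    cases b <;> simp

theorem pvFlatMap_single {α : Type} (L : List Nat) (i0 : Nat) (f : Nat → List α)
    (hmem : i0 ∈ L) (hnd : L.Nodup) (h : ∀ i ∈ L, i ≠ i0 → f i = []) : L.flatMap f = f i0 := by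
  induction L with
  | nil => simp at hmem
  | cons a t ih =>
    rw [List.flatMap_cons]
    rcases List.mem_cons.mp hmem with rfl | hit
    · have : t.flatMap f = [] := by
        rw [List.flatMap_eq_nil_iff]
        intro i hi
        exact h i (by simp [hi]) (fun he => (List.nodup_cons.mp hnd).1 (he ▸ hi))
      rw [this, List.append_nil]
    · rw [h a (by simp) (fun he => (List.nodup_cons.mp hnd).1 (he ▸ hit)),
        ih hit (List.nodup_cons.mp hnd).2 (fun i hi => h i (by simp [hi])), List.nil_append]

-- ===== VERDICT (by name: the statement is the Claim_ definition above) =====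
theorem sort_links_py_spec : Claim_equal_sort_links_py := by
  intro links sks _hdom hmatch
  unfold Spec_sort_links_py
  have hsome : ∀ it ∈ links, (pvFirstKeyA it.2 sks).isSome :=
    fun it hit => pvFirstKeyA_isSome it.2 sks (hmatch it hit)
  have hP : ∀ it ∈ links, pvPrioIdx it.2 sks = some ((pvPrioIdx it.2 sks).getD 0) := by
    intro it hit
    have := hsome it hit
    rw [pvFirstKeyA_eq] at this
    cases hp : pvPrioIdx it.2 sks
    · rw [hp] at this; simp at this
    · simp [hp]
  set n := sks.length with hn
  set pr : (String × (List (String × String))) → Nat := fun it => (pvPrioIdx it.2 sks).getD 0 with hpr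
  -- ===== A side =====
  obtain ⟨dfin, hrun, hgd⟩ := pvBucketsA_getD sks links hsome (PySem.Dict.mk [])
  have hemp : ∀ k, (PySem.Dict.mk ([] : List (String × List (String × (List (String × String)))))).getD k [] = [] := by
    intro k; rfl
  have hA : sort_links_py links sks
      = sks.flatMap (fun k => PySem.List.sorted
          (links.filter (fun it => pvFirstKeyA it.2 sks == some k))
          (fun it => (PySem.Dict.mk it.2).getD k "") false) := by
    simp only [sort_links_py, hrun]
    rw [PySem.List.foldl_append_eq_flatMap, List.nil_append]
    refine List.flatMap_congr (fun k _ => ?_)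
    rw [hgd k, hemp, List.nil_append]
  -- ===== B side =====
  have hg : ∀ it ∈ links,
      (pvRankB it.2 0 sks).map (fun r => (r, it))
        = some (((pr it, sks.getD (pr it) "", (PySem.Dict.mk it.2).getD (sks.getD (pr it) "") ""), it)) := by
    intro it hit
    rw [pvRankB_eq, hP it hit]
    simp
    exact ⟨rfl, rfl, rfl⟩
  have hmm := pvMapM_eq_map (fun it => (pvRankB it.2 0 sks).map (fun r => (r, it)))
    (fun it => (((pr it, sks.getD (pr it) "", (PySem.Dict.mk it.2).getD (sks.getD (pr it) "") ""), it))) links hg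
  set g : (String × (List (String × String))) → ((Nat × String × String) × (String × (List (String × String)))) :=
    fun it => (((pr it, sks.getD (pr it) "", (PySem.Dict.mk it.2).getD (sks.getD (pr it) "") ""), it)) with hgdef
  have hbound : ∀ x ∈ links.map g, (fun p => p.1.1) x < n := by
    intro x hx
    obtain ⟨it, hit, rfl⟩ := List.mem_map.mp hx
    exact pvPrioIdx_lt it.2 sks (pr it) (hP it hit)
  have hB : sort_links_py_alt links sks
      = sks.flatMap (fun k =>
          (((List.range n).flatMap (fun i =>
              PySem.List.sorted ((links.map g).filter (fun p => p.1.1 == i)) (fun p => p.1.2.2) false)).filter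
            (fun p => p.1.2.1 == k)).map (fun p => p.2)) := by
    simp only [sort_links_py_alt, hmm]
    rw [pvSorted2_decompose _ _ _ n hbound]
  rw [hA, hB]
  -- ===== per-key equality =====
  refine List.flatMap_congr (fun k hk => ?_)
  -- first occurrence of k in sks
  obtain ⟨i0, hio⟩ := Option.isSome_iff_exists.mp ((PySem.List.index?_isSome_iff sks k).mpr hk)
  obtain ⟨pre, suf, hsks, hlen, hkpre⟩ := (PySem.List.index?_eq_some_iff sks k i0).mp hio
  have hi0lt : i0 < n := by rw [hn, hsks]; simp; omega
  have hgd0 : sks.getD i0 "" = k := by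
    have hl2 : i0 < (pre ++ k :: suf).length := by simp; omega
    rw [hsks, List.getD_eq_getElem _ _ hl2, List.getElem_append_right (by omega)]
    have h0 : i0 - pre.length = 0 := by omega
    simp [h0]
  have hfirst : ∀ j < i0, sks.getD j "" ≠ k := by
    intro j hj he
    have hjlt : j < (pre ++ k :: suf).length := by simp; omega
    rw [hsks, List.getD_eq_getElem _ _ hjlt, List.getElem_append_left (by omega)] at he
    exact hkpre (he ▸ List.getElem_mem _)
  -- a link whose first match is a later occurrence of k is impossible
  have hNC : ∀ it ∈ links, ∀ i, i0 < i → sks.getD i "" = k → pr it ≠ i := by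
    intro it hit i hi0i hik hpri
    obtain ⟨hmin, hcon⟩ := pvPrioIdx_min it.2 sks (pr it) (hP it hit)
    have h1 : (PySem.Dict.mk it.2).contains (sks.getD i0 "") = false := hmin i0 (by omega)
    rw [hgd0, ← hik, ← hpri] at h1
    rw [h1] at hcon
    exact Bool.false_ne_true hcon
  have hFk : ∀ it ∈ links, (sks.getD (pr it) "" == k) = (pr it == i0) := by
    intro it hit
    by_cases he : pr it = i0
    · rw [he, hgd0]; simp
    · have hne : sks.getD (pr it) "" ≠ k := by
        intro hkk
        rcases Nat.lt_or_ge (pr it) i0 with hlt | hge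
        · exact hfirst (pr it) hlt hkk
        · exact hNC it hit (pr it) (by omega) hkk rfl
      rw [beq_eq_false_iff_ne.mpr hne, beq_eq_false_iff_ne.mpr he]
  -- A's bucket for k
  have hAk : links.filter (fun it => pvFirstKeyA it.2 sks == some k)
      = links.filter (fun it => pr it == i0) := by
    refine List.filter_congr (fun it hit => ?_)
    rw [pvFirstKeyA_eq, hP it hit]
    simp only [Option.map_some]
    rw [show ((some (sks.getD (pr it) "") == some k)) = (sks.getD (pr it) "" == k) by simp]
    exact hFk it hit
  -- B's emission for k collapses to the single chunk at i0
  have hchunk : ∀ i ∈ List.range n,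
      ((PySem.List.sorted ((links.map g).filter (fun p => p.1.1 == i)) (fun p => p.1.2.2) false).filter
          (fun p => p.1.2.1 == k)).map (fun p => p.2)
        = if sks.getD i "" == k then
            PySem.List.sorted (links.filter (fun it => pr it == i)) (fun it => (PySem.Dict.mk it.2).getD k "") false
          else [] := by
    intro i hi
    have hconst : ∀ y ∈ PySem.List.sorted ((links.map g).filter (fun p => p.1.1 == i)) (fun p => p.1.2.2) false,
        (y.1.2.1 == k) = (sks.getD i "" == k) := by
      intro y hy
      rw [PySem.List.mem_sorted, List.mem_filter] at hy
      obtain ⟨hy1, hy2⟩ := hy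
      obtain ⟨it, _, rfl⟩ := List.mem_map.mp hy1
      have : pr it = i := by simpa using hy2
      simp only [hgdef, this]
    rw [pvFilter_of_forall _ _ _ hconst]
    by_cases hik : sks.getD i "" = k
    · rw [if_pos (by rw [hik]; simp), if_pos (by rw [hik]; simp)]
      rw [List.filter_map, pvMap_sorted, List.map_map]
      rw [show ((fun p => p.2) ∘ g) = fun it => it from rfl, List.map_id']
      rw [show (links.filter ((fun p => p.1.1 == i) ∘ g)) = links.filter (fun it => pr it == i) from rfl]
      refine pvSorted_congr _ _ _ (fun y hy => ?_)
      have hpy : pr y = i := by simpa using (List.mem_filter.mp hy).2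
      simp only [hgdef]
      rw [hpy, hik]
    · rw [if_neg (by simp only [beq_iff_eq]; exact hik), if_neg (by simp only [beq_iff_eq]; exact hik)]
      simp
  rw [List.filter_flatMap, List.map_flatMap, List.flatMap_congr hchunk]
  rw [pvFlatMap_single (List.range n) i0 _ (List.mem_range.mpr hi0lt) List.nodup_range (by
    intro i hi hne
    rw [List.mem_range] at hi
    by_cases hik : sks.getD i "" = k
    · rw [if_pos (by rw [hik]; simp)]
      have : links.filter (fun it => pr it == i) = [] := by
        rw [List.filter_eq_nil_iff]
        intro it hit hp
        have hpi : pr it = i := by simpa using hp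
        have hi0i : i0 < i := by
          rcases Nat.lt_or_ge i i0 with hlt | hge
          · exact absurd hik (hfirst i hlt)
          · omega
        exact hNC it hit i hi0i hik hpi
      rw [this]
      rfl
    · rw [if_neg (by simp only [beq_iff_eq]; exact hik)])]
  rw [if_pos (by rw [hgd0]; simp), hAk]
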